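-- pv_equiv track=rewrite | github.com/ikravt89/homework | Lesson_6_homework.py | task12
-- ===== SOURCE A (Python) =====
-- def task12(matrix, number):
--     columns_with_num = []
--     columns_without_num = []
--
--     for column in range(len(matrix[0])):
--         has_number = False
--
--         for row in matrix:
--             if number == row[column]:
--                 has_number = True
--
--         if has_number == True:
--             columns_with_num.append(column)
--         else:
--             columns_without_num.append(column)
--
--     return columns_with_num, columns_without_num
-- ===== SOURCE B (Python) =====
-- def task12(matrix, number):
--     width = len(matrix[0])
--     present = set()
--     for row in matrix:
--         for col in range(width):
--             if row[col] == number: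
--                 present.add(col)
--     columns_with_num = [col for col in range(width) if col in present]
--     columns_without_num = [col for col in range(width) if col not in present]
--     return columns_with_num, columns_without_num
-- ===== Notes on version B (the rewrite author's own statement) =====
-- stated objective: alternative
-- what changed: Replaces the column-major scan with a per-column flag by one row-major pass building a set of column indices that contain the number, followed by a separate classification pass over the column range.
import Mathlib
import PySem

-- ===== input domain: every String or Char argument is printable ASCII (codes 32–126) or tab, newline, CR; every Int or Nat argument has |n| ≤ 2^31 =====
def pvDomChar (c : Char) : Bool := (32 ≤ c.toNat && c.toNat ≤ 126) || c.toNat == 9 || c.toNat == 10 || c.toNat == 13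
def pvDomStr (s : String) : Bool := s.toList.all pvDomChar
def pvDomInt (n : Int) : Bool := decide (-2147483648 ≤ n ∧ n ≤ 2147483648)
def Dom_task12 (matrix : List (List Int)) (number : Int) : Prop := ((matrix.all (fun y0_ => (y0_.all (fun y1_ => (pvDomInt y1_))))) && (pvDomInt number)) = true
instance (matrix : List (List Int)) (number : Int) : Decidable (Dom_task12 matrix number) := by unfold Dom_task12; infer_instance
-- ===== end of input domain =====

-- B differs from A by building a set of matching column indices in one row-major pass, then classifying columns in a second pass (alternative decomposition, same cost).

-- ===== PORT A =====
-- column-wise scan with a per-column flag; row.getD column 0 is row[column], total under Pre_ (column < len(row))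
def task12 (matrix : List (List Int)) (number : Int) : List Int × List Int :=
  (List.range (matrix.headD []).length).foldl
    (fun (acc : List Int × List Int) (column : Nat) =>
      let has_number := matrix.foldl
        (fun h row => if number = row.getD column 0 then true else h) false
      if has_number = true then (acc.1 ++ [Int.ofNat column], acc.2)
      else (acc.1, acc.2 ++ [Int.ofNat column]))
    ([], [])

-- ===== PORT B =====
-- row-major pass building a PySem.Set of matching column indices, then a classification pass
def task12_alt (matrix : List (List Int)) (number : Int) : List Int × List Int :=
  let width := (matrix.headD []).length
  let present : PySem.Set Int := matrix.foldl
    (fun s row =>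
      (List.range width).foldl
        (fun s (col : Nat) => if row.getD col 0 = number then PySem.Set.add s (Int.ofNat col) else s) s)
    PySem.Set.empty
  (((List.range width).filter (fun (col : Nat) => decide (Int.ofNat col ∈ present))).map Int.ofNat,
   ((List.range width).filter (fun (col : Nat) => decide (Int.ofNat col ∉ present))).map Int.ofNat)

-- ===== PRECONDITION & SPEC =====
-- Pre_ excludes exactly the inputs on which A raises IndexError: the empty matrix (matrix[0]) and ragged matrices with a row shorter than the first row (row[column]); B raises there too.
def Pre_task12 (matrix : List (List Int)) (number : Int) : Prop :=
  matrix ≠ [] ∧ ∀ row ∈ matrix, (matrix.headD []).length ≤ row.length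
instance (matrix : List (List Int)) (number : Int) : Decidable (Pre_task12 matrix number) := by unfold Pre_task12; infer_instance

def pvWitness_task12 : List (List Int) × Int := ([[1, 2, 3], [4, 2, 6]], 2)

def Spec_task12 (matrix : List (List Int)) (number : Int) (out : List Int × List Int) : Prop := out = task12_alt matrix number
instance (matrix : List (List Int)) (number : Int) (out : List Int × List Int) : Decidable (Spec_task12 matrix number out) := by unfold Spec_task12; infer_instance

-- ===== CLAIM (what is proved, stated in full; the proofs are below) =====
def Claim_equal_task12 : Prop := ∀ (matrix : List (List Int)) (number : Int), Dom_task12 matrix number → Pre_task12 matrix number → Spec_task12 matrix number (task12 matrix number)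

-- ===== LEMMAS AND PROOFS =====

-- A's flag loop returns true iff some row matches at that column
theorem task12_flag_iff (matrix : List (List Int)) (number : Int) (column : Nat) :
    (matrix.foldl (fun h row => if number = row.getD column 0 then true else h) false = true)
      ↔ ∃ row ∈ matrix, number = row.getD column 0 := by
  have gen : ∀ (ms : List (List Int)) (b : Bool),
      (ms.foldl (fun h row => if number = row.getD column 0 then true else h) b = true)
        ↔ b = true ∨ ∃ row ∈ ms, number = row.getD column 0 := by
    intro ms
    induction ms with
    | nil => simp
    | cons r rs ih =>
      intro b
      simp only [List.foldl_cons, ih]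
      by_cases h : number = r.getD column 0 <;> simp [h] <;> tauto
  simpa using gen matrix false

-- membership in B's set after the nested fold
theorem task12_present_iff (matrix : List (List Int)) (number : Int) (width : Nat) (x : Int) :
    (x ∈ matrix.foldl
        (fun s row => (List.range width).foldl
          (fun s (col : Nat) => if row.getD col 0 = number then PySem.Set.add s (Int.ofNat col) else s) s)
        PySem.Set.empty)
      ↔ ∃ row ∈ matrix, ∃ col < width, row.getD col 0 = number ∧ x = Int.ofNat col := by
  have inner : ∀ (row : List Int) (s : PySem.Set Int),
      (x ∈ (List.range width).foldl
        (fun s (col : Nat) => if row.getD col 0 = number then PySem.Set.add s (Int.ofNat col) else s) s)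
        ↔ x ∈ s ∨ ∃ col < width, row.getD col 0 = number ∧ x = Int.ofNat col := by
    intro row
    have gen : ∀ (l : List Nat) (s : PySem.Set Int),
        (x ∈ l.foldl
          (fun s (col : Nat) => if row.getD col 0 = number then PySem.Set.add s (Int.ofNat col) else s) s)
          ↔ x ∈ s ∨ ∃ col ∈ l, row.getD col 0 = number ∧ x = Int.ofNat col := by
      intro l
      induction l with
      | nil => simp
      | cons c cs ih =>
        intro s
        rw [List.foldl_cons, ih]
        by_cases h : row.getD c 0 = number
        · rw [if_pos h]
          simp only [PySem.Set.mem_add]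
          constructor
          · rintro ((hs | hx) | ⟨col, hc, hp⟩)
            · exact Or.inl hs
            · exact Or.inr ⟨c, List.mem_cons_self, h, hx⟩
            · exact Or.inr ⟨col, List.mem_cons_of_mem _ hc, hp⟩
          · rintro (hs | ⟨col, hc, hp, hx⟩)
            · exact Or.inl (Or.inl hs)
            · rcases List.mem_cons.mp hc with rfl | hc'
              · exact Or.inl (Or.inr hx)
              · exact Or.inr ⟨col, hc', hp, hx⟩
        · rw [if_neg h]
          constructor
          · rintro (hs | ⟨col, hc, hp⟩)
            · exact Or.inl hs
            · exact Or.inr ⟨col, List.mem_cons_of_mem _ hc, hp⟩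
          · rintro (hs | ⟨col, hc, hp, hx⟩)
            · exact Or.inl hs
            · rcases List.mem_cons.mp hc with rfl | hc'
              · exact absurd hp h
              · exact Or.inr ⟨col, hc', hp, hx⟩
    intro s
    simpa using gen (List.range width) s
  have gen : ∀ (ms : List (List Int)) (s : PySem.Set Int),
      (x ∈ ms.foldl
        (fun s row => (List.range width).foldl
          (fun s (col : Nat) => if row.getD col 0 = number then PySem.Set.add s (Int.ofNat col) else s) s) s)
        ↔ x ∈ s ∨ ∃ row ∈ ms, ∃ col < width, row.getD col 0 = number ∧ x = Int.ofNat col := by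
    intro ms
    induction ms with
    | nil => simp
    | cons r rs ih =>
      intro s
      rw [List.foldl_cons, ih, inner r]
      constructor
      · rintro ((hs | hcol) | ⟨row, hr, hcol⟩)
        · exact Or.inl hs
        · exact Or.inr ⟨r, List.mem_cons_self, hcol⟩
        · exact Or.inr ⟨row, List.mem_cons_of_mem _ hr, hcol⟩
      · rintro (hs | ⟨row, hr, hcol⟩)
        · exact Or.inl (Or.inl hs)
        · rcases List.mem_cons.mp hr with rfl | hr'
          · exact Or.inl (Or.inr hcol)
          · exact Or.inr ⟨row, hr', hcol⟩
  simpa [PySem.Set.empty] using gen matrix PySem.Set.empty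

-- A's append-pair fold is a pair of filters
theorem task12_pairfold (q : Nat → Bool) (l : List Nat) (a b : List Int) :
    l.foldl (fun (acc : List Int × List Int) column =>
        if q column = true then (acc.1 ++ [Int.ofNat column], acc.2)
        else (acc.1, acc.2 ++ [Int.ofNat column])) (a, b)
      = (a ++ (l.filter q).map Int.ofNat, b ++ (l.filter (fun c => !q c)).map Int.ofNat) := by
  induction l generalizing a b with
  | nil => simp
  | cons c cs ih =>
    simp only [List.foldl_cons]
    by_cases h : q c = true
    · rw [if_pos h, ih]
      simp [h, List.filter_cons]
    · rw [if_neg h, ih]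
      simp [h, List.filter_cons]

-- ===== VERDICT (by name: the statement is the Claim_ definition above) =====
theorem task12_spec : Claim_equal_task12 := by
  intro matrix number _ _
  unfold Spec_task12 task12 task12_alt
  simp only []
  rw [task12_pairfold]
  simp only [List.nil_append]
  have hq : ∀ col ∈ List.range (matrix.headD []).length,
      (matrix.foldl (fun h row => if number = row.getD col 0 then true else h) false)
        = decide (Int.ofNat col ∈ matrix.foldl
            (fun s row => (List.range (matrix.headD []).length).foldl
              (fun s (c : Nat) => if row.getD c 0 = number then PySem.Set.add s (Int.ofNat c) else s) s)
            PySem.Set.empty) := by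
    intro col hcol
    rw [List.mem_range] at hcol
    rw [Bool.eq_iff_iff]
    rw [task12_flag_iff, decide_eq_true_eq, task12_present_iff]
    constructor
    · rintro ⟨row, hr, hm⟩
      exact ⟨row, hr, col, hcol, hm.symm, rfl⟩
    · rintro ⟨row, hr, c, _, hm, hx⟩
      have : c = col := (Int.ofNat.inj hx).symm
      subst this
      exact ⟨row, hr, hm.symm⟩
  refine congrArg₂ Prod.mk ?_ ?_
  · exact congrArg _ (List.filter_congr hq)
  · apply congrArg
    apply List.filter_congr
    intro col hcol
    rw [hq col hcol]
    simp
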